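-- pv_equiv track=rewrite | github.com/halesyy/fitting-compression | attempts/byte-fb-noise/main.py | forward_noise
-- ===== SOURCE A (Python) =====
-- def overlay_37r_noise(values):
--    next_state = [0] * len(values)
--    for i in range(len(values)):
--       next_state[i] = values[i-1] ^ values[(i+1) % len(values)]
--    return next_state
--
-- def forward_noise(byte_group, seed):
--    values = list(byte_group) # Bytes -> List
--    iterations = 1
--    # seed = 42
--    # Implement p37.
--    prng = [seed]
--
--    # Go through byte group, adding to the prng list.
--    for _ in range(len(byte_group) - 1):
--       prng.append(overlay_37r_noise(prng)[-1])
--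
--    # Apply the cellular automaton
--    for _ in range(iterations):
--       prng = overlay_37r_noise(prng)
--       values = [x ^ y for x, y in zip(values, prng)]
--       values = values[1:] + [values[0]]
--
--    return values
-- ===== SOURCE B (Python) =====
-- def forward_noise(byte_group, seed):
--     # O(n) closed form: the PRNG list A builds is periodic with period 4
--     # (seed,0,0,seed,...), so after the single CA pass every interior mask
--     # entry is exactly `seed` and only the two boundary entries depend on
--     # len(byte_group) % 4; the final rotate-left-by-1 is applied directly.
--     n = len(byte_group)
--     if n == 0:
--         return []
--     if n == 1:
--         return [byte_group[0]]
--     r4 = n % 4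
--     first = seed if r4 in (0, 1) else 0
--     last = 0 if r4 in (1, 2) else seed
--     out = [x ^ seed for x in byte_group[1:-1]]
--     out.append(byte_group[-1] ^ last)
--     out.append(byte_group[0] ^ first)
--     return out
-- ===== Notes on version B (the rewrite author's own statement) =====
-- stated objective: faster
-- what changed: B replaces A's quadratic rebuild of the PRNG list (a full overlay pass per appended element) and the final overlay/zip/rotate passes by a closed form: the PRNG is periodic with period 4, so after one CA pass every interior mask entry equals seed and only the two boundary entries depend on len % 4, giving a single O(n) map with two boundary fixups.
import Mathlib
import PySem

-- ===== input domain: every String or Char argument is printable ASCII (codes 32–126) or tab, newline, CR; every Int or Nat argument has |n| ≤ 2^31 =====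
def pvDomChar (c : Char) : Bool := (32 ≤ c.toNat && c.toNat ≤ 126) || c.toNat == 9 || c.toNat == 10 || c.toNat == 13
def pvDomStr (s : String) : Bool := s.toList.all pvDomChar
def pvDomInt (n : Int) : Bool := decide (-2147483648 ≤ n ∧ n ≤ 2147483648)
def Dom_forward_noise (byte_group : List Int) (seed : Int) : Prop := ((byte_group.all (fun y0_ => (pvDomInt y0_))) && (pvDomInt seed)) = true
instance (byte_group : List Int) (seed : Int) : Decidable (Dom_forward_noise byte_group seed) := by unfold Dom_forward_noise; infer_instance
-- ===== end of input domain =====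

-- B replaces A's O(n^2) PRNG rebuild by the period-4 closed form of the mask; equivalence is about the return value only.

-- B replaces A's O(n^2) PRNG rebuild by the period-4 closed form of the mask (objective: faster); equivalence is about the return value on nonempty byte_group.

-- ===== PORT A =====
-- next_state[i] = values[i-1] ^ values[(i+1) % len]; indices are always in range on a nonempty list
def overlay_37r_noise (values : List Int) : List Int :=
  (PySem.List.pyRange 0 (values.length : Int) 1).map (fun i =>
    PySem.Int.bxor (PySem.List.pyGetD values (i - 1) 0)
      (PySem.List.pyGetD values (PySem.Int.mod (i + 1) (values.length : Int)) 0))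

def forward_noise (byte_group : List Int) (seed : Int) : List Int :=
  let values := byte_group
  let prng := (PySem.List.pyRange 0 ((byte_group.length : Int) - 1) 1).foldl
    (fun prng _ => prng ++ [PySem.List.pyGetD (overlay_37r_noise prng) (-1) 0]) [seed]
  let prng := overlay_37r_noise prng
  let values := (values.zip prng).map (fun p => PySem.Int.bxor p.1 p.2)
  PySem.List.slice values (some 1) none ++ [PySem.List.pyGetD values 0 0]


-- ===== PORT B =====
def forward_noise_alt (byte_group : List Int) (seed : Int) : List Int :=
  let n : Int := byte_group.length
  if n = 0 then []
  else if n = 1 then [PySem.List.pyGetD byte_group 0 0]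
  else
    let r4 := PySem.Int.mod n 4
    let first := if r4 = 0 ∨ r4 = 1 then seed else 0
    let last := if r4 = 1 ∨ r4 = 2 then 0 else seed
    let out := (PySem.List.slice byte_group (some 1) (some (-1))).map
      (fun x => PySem.Int.bxor x seed)
    out ++ [PySem.Int.bxor (PySem.List.pyGetD byte_group (-1) 0) last,
            PySem.Int.bxor (PySem.List.pyGetD byte_group 0 0) first]


-- ===== PRECONDITION & SPEC =====
-- A raises IndexError on an empty byte_group (values[0] on the empty rotated list); Pre_ excludes exactly that input.
def Pre_forward_noise (byte_group : List Int) (seed : Int) : Prop := byte_group ≠ []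
instance (byte_group : List Int) (seed : Int) : Decidable (Pre_forward_noise byte_group seed) := by
  unfold Pre_forward_noise; infer_instance

def pvWitness_forward_noise : List Int × Int := ([3, 1, 4, 1, 5], 42)

def Spec_forward_noise (byte_group : List Int) (seed : Int) (out : List Int) : Prop := out = forward_noise_alt byte_group seed
instance (byte_group : List Int) (seed : Int) (out : List Int) : Decidable (Spec_forward_noise byte_group seed out) := by unfold Spec_forward_noise; infer_instance

-- ===== CLAIM (what is proved, stated in full; the proofs are below) =====
def Claim_equal_forward_noise : Prop := ∀ (byte_group : List Int) (seed : Int), Dom_forward_noise byte_group seed → Pre_forward_noise byte_group seed → Spec_forward_noise byte_group seed (forward_noise byte_group seed)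

-- ===== LEMMAS AND PROOFS =====

-- the value A's PRNG list holds at position k: seed when k % 4 ∈ {0,3}, else 0
def pat (s : Int) (k : Nat) : Int := if k % 4 = 0 ∨ k % 4 = 3 then s else 0
def patList (s : Int) (n : Nat) : List Int := (List.range n).map (pat s)

theorem getD_patList (s : Int) {n j : Nat} (h : j < n) : (patList s n).getD j 0 = pat s j := by
  simp [patList, List.getD_eq_getElem?_getD, h]

theorem overlay_eq (q : List Int) :
    overlay_37r_noise q = (List.range q.length).map (fun k =>
      PySem.Int.bxor (q.getD (if k = 0 then q.length - 1 else k - 1) 0)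
        (q.getD ((k + 1) % q.length) 0)) := by
  unfold overlay_37r_noise
  rw [PySem.List.pyRange_zero_natCast, List.map_map]
  apply List.map_congr_left
  intro k hk
  have hk' : k < q.length := List.mem_range.mp hk
  have hq : q ≠ [] := by
    intro h; rw [h] at hk'; simp at hk'
  show PySem.Int.bxor (PySem.List.pyGetD q ((k:Int) - 1) 0)
      (PySem.List.pyGetD q (PySem.Int.mod ((k:Int) + 1) (q.length : Int)) 0) = _
  have e2 : PySem.List.pyGetD q (PySem.Int.mod ((k:Int) + 1) (q.length : Int)) 0
      = q.getD ((k + 1) % q.length) 0 := by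
    rw [show ((k:Int) + 1) = ((k+1 : Nat) : Int) by push_cast; ring, PySem.Int.mod_natCast,
      PySem.List.pyGetD_natCast]
  rw [e2]
  by_cases h0 : k = 0
  · subst h0
    rw [show ((0:Nat):Int) - 1 = (-1 : Int) by norm_num, PySem.List.pyGetD_neg_one _ _ hq,
      List.getLast_eq_getElem, if_pos rfl,
      List.getD_eq_getElem _ 0 (show q.length - 1 < q.length by omega)]
  · rw [show ((k:Nat):Int) - 1 = ((k-1 : Nat):Int) by omega, PySem.List.pyGetD_natCast, if_neg h0]

theorem bxor_zero_left (s : Int) : PySem.Int.bxor 0 s = s := by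
  rw [PySem.Int.bxor_comm]; exact PySem.Int.bxor_zero s


theorem pat_step (s : Int) (m : Nat) (h : 1 ≤ m) :
    PySem.Int.bxor (pat s (m - 1)) s = pat s (m + 1) := by
  have h4 : m % 4 = 0 ∨ m % 4 = 1 ∨ m % 4 = 2 ∨ m % 4 = 3 := by omega
  rcases h4 with h4 | h4 | h4 | h4
  · have e1 : (m - 1) % 4 = 3 := by omega
    have e2 : (m + 1) % 4 = 1 := by omega
    simp [pat, e1, e2]
  · have e1 : (m - 1) % 4 = 0 := by omega
    have e2 : (m + 1) % 4 = 2 := by omega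
    simp [pat, e1, e2]
  · have e1 : (m - 1) % 4 = 1 := by omega
    have e2 : (m + 1) % 4 = 3 := by omega
    simp [pat, e1, e2, bxor_zero_left]
  · have e1 : (m - 1) % 4 = 2 := by omega
    have e2 : (m + 1) % 4 = 0 := by omega
    simp [pat, e1, e2, bxor_zero_left]

theorem pat_interior (s : Int) (j : Nat) :
    PySem.Int.bxor (pat s j) (pat s (j + 2)) = s := by
  have h4 : j % 4 = 0 ∨ j % 4 = 1 ∨ j % 4 = 2 ∨ j % 4 = 3 := by omega
  rcases h4 with h4 | h4 | h4 | h4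
  · have e2 : (j + 2) % 4 = 2 := by omega
    simp [pat, h4, e2]
  · have e2 : (j + 2) % 4 = 3 := by omega
    simp [pat, h4, e2, bxor_zero_left]
  · have e2 : (j + 2) % 4 = 0 := by omega
    simp [pat, h4, e2, bxor_zero_left]
  · have e2 : (j + 2) % 4 = 1 := by omega
    simp [pat, h4, e2]

theorem pat_last (s : Int) (n : Nat) (h : 2 ≤ n) :
    PySem.Int.bxor (pat s (n - 2)) s = if n % 4 = 1 ∨ n % 4 = 2 then 0 else s := by
  have h4 : n % 4 = 0 ∨ n % 4 = 1 ∨ n % 4 = 2 ∨ n % 4 = 3 := by omega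
  rcases h4 with h4 | h4 | h4 | h4
  · have e1 : (n - 2) % 4 = 2 := by omega
    simp [pat, h4, e1, bxor_zero_left]
  · have e1 : (n - 2) % 4 = 3 := by omega
    simp [pat, h4, e1]
  · have e1 : (n - 2) % 4 = 0 := by omega
    simp [pat, h4, e1]
  · have e1 : (n - 2) % 4 = 1 := by omega
    simp [pat, h4, e1, bxor_zero_left]

theorem pat_first (s : Int) (n : Nat) (h : 1 ≤ n) :
    pat s (n - 1) = if n % 4 = 0 ∨ n % 4 = 1 then s else 0 := by
  have h4 : n % 4 = 0 ∨ n % 4 = 1 ∨ n % 4 = 2 ∨ n % 4 = 3 := by omega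
  rcases h4 with h4 | h4 | h4 | h4
  · have e1 : (n - 1) % 4 = 3 := by omega
    simp [pat, h4, e1]
  · have e1 : (n - 1) % 4 = 0 := by omega
    simp [pat, h4, e1]
  · have e1 : (n - 1) % 4 = 1 := by omega
    simp [pat, h4, e1]
  · have e1 : (n - 1) % 4 = 2 := by omega
    simp [pat, h4, e1]

theorem length_patList (s : Int) (n : Nat) : (patList s n).length = n := by simp [patList]

theorem overlay_last (s : Int) (m : Nat) :
    PySem.List.pyGetD (overlay_37r_noise (patList s (m + 1))) (-1) 0 = pat s (m + 1) := by
  rw [overlay_eq, length_patList, List.range_succ, List.map_append, List.map_singleton,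
    PySem.List.pyGetD_neg_one_append_singleton, Nat.mod_self,
    getD_patList s (show 0 < m + 1 by omega), show pat s 0 = s by simp [pat]]
  by_cases h0 : m = 0
  · subst h0
    rw [if_pos rfl, show 0 + 1 - 1 = 0 by omega, getD_patList s (show 0 < 0 + 1 by omega)]
    simp [pat]
  · rw [if_neg h0, getD_patList s (show m - 1 < m + 1 by omega)]
    exact pat_step s m (by omega)

theorem step_patList (s : Int) (m : Nat) :
    patList s (m + 1) ++ [PySem.List.pyGetD (overlay_37r_noise (patList s (m + 1))) (-1) 0]
      = patList s (m + 2) := by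
  rw [overlay_last]
  simp [patList, List.range_succ]

theorem build_patList (s : Int) (n : Nat) :
    ((PySem.List.pyRange 0 ((n : Int)) 1).foldl
      (fun prng _ => prng ++ [PySem.List.pyGetD (overlay_37r_noise prng) (-1) 0]) [s])
      = patList s (n + 1) := by
  induction n with
  | zero => simp [PySem.List.pyRange_one_eq_nil, patList, pat]
  | succ k ih =>
    rw [show ((k + 1 : Nat) : Int) = (k : Int) + 1 by push_cast; ring,
      PySem.List.pyRange_one_succ_right (by positivity), List.foldl_append, ih]
    simp [step_patList]

theorem overlay_patList (s : Int) (n : Nat) (h : 0 < n) :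
    overlay_37r_noise (patList s n) = (List.range n).map (fun k =>
      PySem.Int.bxor (pat s (if k = 0 then n - 1 else k - 1)) (pat s ((k + 1) % n))) := by
  rw [overlay_eq, length_patList]
  apply List.map_congr_left
  intro k hk
  have hk' : k < n := List.mem_range.mp hk
  rw [getD_patList s (Nat.mod_lt _ h)]
  by_cases h0 : k = 0
  · rw [if_pos h0, getD_patList s (show n - 1 < n by omega)]
  · rw [if_neg h0, getD_patList s (show k - 1 < n by omega)]

theorem slice_one_neg_one (v : List Int) : PySem.List.slice v (some 1) (some (-1)) = v.tail.dropLast := by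
  simp [PySem.List.slice, PySem.List.clampIdx]
  rcases v with _ | ⟨a, t⟩
  · simp
  · simp only [if_neg (by simp : ¬(a :: t = []))]
    have h1 : min 1 (a :: t).length = 1 := by simp
    rw [h1]
    have h2 : ((((a :: t).length : Int)) + -1).toNat = t.length := by simp
    rw [h2, List.drop_one, List.tail_cons, List.dropLast_eq_take]

theorem getElem_zipmap (v r : List Int) (i : Nat) (hv : i < v.length) (hr : i < r.length)
    (h : i < ((v.zip r).map (fun p => PySem.Int.bxor p.1 p.2)).length) :
    ((v.zip r).map (fun p => PySem.Int.bxor p.1 p.2))[i] = PySem.Int.bxor v[i] r[i] := by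
  simp [List.getElem_zip]

theorem forward_noise_eq_alt (v : List Int) (s : Int) (hv : v ≠ []) :
    forward_noise v s = forward_noise_alt v s := by
  have hn : 1 ≤ v.length := List.length_pos_of_ne_nil hv
  simp only [forward_noise]
  rw [show ((v.length : Int) - 1) = ((v.length - 1 : Nat) : Int) by omega,
    build_patList, show v.length - 1 + 1 = v.length by omega,
    overlay_patList s v.length (by omega)]
  rw [PySem.List.slice_from_one, PySem.List.pyGetD_zero]
  rcases Nat.lt_or_ge v.length 2 with hn2 | hn2
  · -- length 1
    obtain ⟨a, rfl⟩ : ∃ a, v = [a] := by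
      rcases v with _ | ⟨a, t⟩
      · simp at hn
      · rcases t with _ | ⟨b, u⟩
        · exact ⟨a, rfl⟩
        · simp at hn2
    simp [forward_noise_alt, pat]
  · -- length ≥ 2
    have hRHS : forward_noise_alt v s
        = (v.tail.dropLast.map (fun x => PySem.Int.bxor x s))
          ++ [PySem.Int.bxor (v.getLast hv) (if v.length % 4 = 1 ∨ v.length % 4 = 2 then 0 else s),
              PySem.Int.bxor (v.getD 0 0) (if v.length % 4 = 0 ∨ v.length % 4 = 1 then s else 0)] := by
      simp only [forward_noise_alt]
      rw [if_neg (by exact_mod_cast (show ¬ v.length = 0 by omega) : ¬ ((v.length : Int) = 0)),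
        if_neg (by exact_mod_cast (show ¬ v.length = 1 by omega) : ¬ ((v.length : Int) = 1)),
        show (4 : Int) = ((4 : Nat) : Int) by norm_num, PySem.Int.mod_natCast,
        slice_one_neg_one, PySem.List.pyGetD_neg_one _ _ hv, PySem.List.pyGetD_zero]
      norm_cast
    rw [hRHS]
    have hWe : ∀ (i : Nat) (hi : i < v.length),
        ((v.zip ((List.range v.length).map (fun k =>
            PySem.Int.bxor (pat s (if k = 0 then v.length - 1 else k - 1))
              (pat s ((k + 1) % v.length))))).map
          (fun p => PySem.Int.bxor p.1 p.2))[i]'(by simp [hi])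
        = PySem.Int.bxor (v[i]'hi)
          (PySem.Int.bxor (pat s (if i = 0 then v.length - 1 else i - 1))
            (pat s ((i + 1) % v.length))) := by
      intro i hi
      rw [getElem_zipmap v _ i hi (by simp [hi]) (by simp [hi])]
      congr 1
      rw [List.getElem_map, List.getElem_range]
    apply List.ext_getElem
    · simp
      omega
    · intro j h1 h2
      have hjv : j < v.length := by
        simp at h1
        omega
      by_cases hj : j < v.length - 1
      · rw [List.getElem_append_left (by simp; omega), List.getElem_tail, hWe (j + 1) (by omega)]
        by_cases hj2 : j < v.length - 2
        · rw [List.getElem_append_left (by simp; omega)]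
          rw [List.getElem_map, List.getElem_dropLast, List.getElem_tail]
          rw [if_neg (by omega), show j + 1 - 1 = j by omega,
            show (j + 1 + 1) % v.length = j + 2 from Nat.mod_eq_of_lt (by omega),
            pat_interior]
        · -- j = v.length - 2
          rw [List.getElem_append_right (by simp; omega)]
          have hidx : j - (v.tail.dropLast.map (fun x => PySem.Int.bxor x s)).length = 0 := by
            simp; omega
          simp only [hidx, List.getElem_cons_zero]
          rw [if_neg (by omega), show j + 1 - 1 = v.length - 2 by omega,
            show j + 1 + 1 = v.length by omega, Nat.mod_self,
            show pat s 0 = s by simp [pat], pat_last s v.length hn2,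
            List.getLast_eq_getElem]
          simp only [show j + 1 = v.length - 1 by omega]
      · -- j = v.length - 1
        rw [List.getElem_append, List.getElem_append]
        simp only [List.length_tail, List.length_map, List.length_zip, List.length_range,
          List.length_dropLast, min_self]
        rw [dif_neg (show ¬ j < v.length - 1 by omega),
          dif_neg (show ¬ j < v.length - 1 - 1 by omega)]
        simp only [show j - (v.length - 1) = 0 by omega,
          show j - (v.length - 1 - 1) = 1 by omega,
          List.getElem_cons_zero, List.getElem_cons_succ]
        rw [List.getD_eq_getElem _ 0 (by simp; omega), hWe 0 (by omega)]
        rw [if_pos rfl, show (0 + 1) % v.length = 1 from Nat.mod_eq_of_lt (by omega),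
          show pat s 1 = 0 by simp [pat], PySem.Int.bxor_zero,
          pat_first s v.length (by omega), List.getD_eq_getElem _ 0 (by omega)]

-- ===== VERDICT (by name: the statement is the Claim_ definition above) =====
theorem forward_noise_spec : Claim_equal_forward_noise := by
  intro byte_group seed _ hp
  unfold Spec_forward_noise
  exact forward_noise_eq_alt byte_group seed hp
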